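-- pv_equiv track=rewrite | github.com/markbroich/coding_challenges_example_solutions | coding_challenges_example_solutions/palindrome_permutation2/PalindromePermutation2.py | add_rev_and_odd
-- ===== SOURCE A (Python) =====
-- def add_rev_and_odd(lst, oddItem=None):
--     lenLst = len(lst)
--     # there is at most one odd item
--     if oddItem:
--         lst.append(oddItem)
--     # make slots for even items and bring in rev of even
--     lst = lst + [''] * lenLst
--     for i in range(0, lenLst):
--         lst[-1 - i] = lst[i]
--     return lst
-- ===== SOURCE B (Python) =====
-- def add_rev_and_odd(lst, oddItem=None):
--     # snapshot the mirror half up front: reverse of the original list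
--     mirror = lst[::-1]
--     # there is at most one odd item
--     if oddItem:
--         lst.append(oddItem)
--     return lst + mirror
-- ===== Notes on version B (the rewrite author's own statement) =====
-- stated objective: simpler
-- what changed: Instead of preallocating '' slots and filling them back-to-front by negative-index writes, B snapshots the reverse of the original list up front and returns one concatenation; no length bookkeeping or index loop remains.
import Mathlib
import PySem

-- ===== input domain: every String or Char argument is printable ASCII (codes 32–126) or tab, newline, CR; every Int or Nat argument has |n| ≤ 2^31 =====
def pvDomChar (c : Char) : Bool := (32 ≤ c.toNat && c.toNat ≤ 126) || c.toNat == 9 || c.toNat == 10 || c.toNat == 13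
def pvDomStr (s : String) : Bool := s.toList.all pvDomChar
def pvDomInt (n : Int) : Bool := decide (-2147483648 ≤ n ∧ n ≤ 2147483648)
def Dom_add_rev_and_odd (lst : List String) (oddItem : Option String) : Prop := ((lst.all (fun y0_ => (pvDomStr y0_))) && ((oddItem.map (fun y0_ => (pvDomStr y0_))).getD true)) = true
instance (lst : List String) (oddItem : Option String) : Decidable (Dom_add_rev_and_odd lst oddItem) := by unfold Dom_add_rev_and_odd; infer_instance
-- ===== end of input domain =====

-- B snapshots the reverse of the original list up front and returns one concatenation,
-- replacing A's preallocate-''-slots-and-negative-index-fill loop (simpler decomposition).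
-- A mutates its argument (append of oddItem); B performs the same append;
-- equivalence proved for the RETURN value.


-- ===== PORT A =====
def add_rev_and_odd (lst : List String) (oddItem : Option String) : List String :=
  let lenLst : Int := lst.length
  -- `if oddItem:` — truthy iff present and non-empty
  let lst1 : List String :=
    match oddItem with
    | none => lst
    | some s => if s = "" then lst else lst ++ [s]
  -- lst = lst + [''] * lenLst
  let lst2 : List String := lst1 ++ List.replicate lenLst.toNat ""
  -- for i in range(0, lenLst): lst[-1 - i] = lst[i]
  (PySem.List.pyRange 0 lenLst 1).foldl
    (fun acc i => PySem.List.pySetD acc (-1 - i) (PySem.List.pyGetD acc i "")) lst2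

-- ===== PORT B =====
def add_rev_and_odd_alt (lst : List String) (oddItem : Option String) : List String :=
  -- mirror = lst[::-1]  (snapshot of the reverse of the ORIGINAL list, taken first)
  let mirror : List String := (PySem.List.slice? lst none none (-1)).getD []
  -- if oddItem: lst.append(oddItem);  return lst + mirror
  (match oddItem with
   | none => lst
   | some s => if s = "" then lst else lst ++ [s]) ++ mirror

-- ===== PRECONDITION & SPEC =====
def Spec_add_rev_and_odd (lst : List String) (oddItem : Option String) (out : List String) : Prop := out = add_rev_and_odd_alt lst oddItem
instance (lst : List String) (oddItem : Option String) (out : List String) : Decidable (Spec_add_rev_and_odd lst oddItem out) := by unfold Spec_add_rev_and_odd; infer_instance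

-- ===== CLAIM (what is proved, stated in full; the proofs are below) =====
def Claim_equal_add_rev_and_odd : Prop := ∀ (lst : List String) (oddItem : Option String), Dom_add_rev_and_odd lst oddItem → Spec_add_rev_and_odd lst oddItem (add_rev_and_odd lst oddItem)

-- ===== LEMMAS AND PROOFS =====

-- Python `xs[-1-k] = v` for 0 ≤ k < len(xs): write at position len-1-k.
lemma pySetD_neg_one_sub {α : Type} (xs : List α) (k : Nat) (v : α) (hk : k < xs.length) :
    PySem.List.pySetD xs (-1 - (k : Int)) v = xs.set (xs.length - 1 - k) v := by
  unfold PySem.List.pySetD PySem.List.pySet? PySem.List.pyIdx?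
  rw [if_neg (by omega), if_pos (by omega)]
  simp only [Option.map_some, Option.getD_some]
  congr 1
  omega

-- Writing v at the last slot of a replicate block.
lemma set_replicate_last {α : Type} (m : Nat) (d v : α) :
    (List.replicate (m+1) d).set m v = List.replicate m d ++ [v] := by
  rw [List.replicate_succ', List.set_append_right _ _ (by simp)]
  simp

-- Loop invariant for A's fill loop: after the first k iterations the last k slots
-- hold the reverse of the first k elements of the original list.
lemma fill_loop (orig lst1 : List String)
    (hlen : orig.length ≤ lst1.length)
    (hpre : lst1.take orig.length = orig)
    (k : Nat) (hk : k ≤ orig.length) :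
    ((List.range k).map (fun (j : Nat) => (j : Int))).foldl
      (fun acc i => PySem.List.pySetD acc (-1 - i) (PySem.List.pyGetD acc i ""))
      (lst1 ++ List.replicate orig.length "")
    = lst1 ++ (List.replicate (orig.length - k) "" ++ (orig.take k).reverse) := by
  induction k with
  | zero => simp
  | succ k ih =>
    have hk' : k ≤ orig.length := by omega
    have hkn : k < orig.length := by omega
    have hklst1 : k < lst1.length := by omega
    rw [List.range_succ, List.map_append, List.foldl_append, ih hk']
    simp only [List.map_cons, List.map_nil, List.foldl_cons, List.foldl_nil]
    have hplen : (lst1 ++ (List.replicate (orig.length - k) "" ++ (orig.take k).reverse)).length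
        = lst1.length + orig.length := by simp; omega
    have h2 : lst1[k]? = orig[k]? := by
      conv_rhs => rw [← hpre]
      rw [List.getElem?_take_of_lt hkn]
    have hread : PySem.List.pyGetD
        (lst1 ++ (List.replicate (orig.length - k) "" ++ (orig.take k).reverse)) (k : Int) ""
        = orig[k]'hkn := by
      rw [PySem.List.pyGetD_natCast, List.getD_append _ _ _ _ hklst1,
        List.getD_eq_getElem?_getD, h2, List.getElem?_eq_getElem hkn, Option.getD_some]
    rw [hread, pySetD_neg_one_sub _ k _ (by rw [hplen]; omega), hplen]
    have hidx : lst1.length + orig.length - 1 - k = lst1.length + (orig.length - k - 1) := by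
      omega
    rw [hidx, List.set_append_right _ _ (by omega), Nat.add_sub_cancel_left]
    congr 1
    rw [List.set_append_left _ _ (by simp; omega)]
    have hm : orig.length - k = (orig.length - k - 1) + 1 := by omega
    rw [hm, Nat.add_sub_cancel, set_replicate_last, List.append_assoc]
    have hm2 : orig.length - (k + 1) = orig.length - k - 1 := by omega
    rw [hm2]
    rw [List.take_add_one, List.getElem?_eq_getElem hkn, List.reverse_append]
    rfl

-- lst1 extends orig: its first orig.length elements are orig.
lemma take_lst1 (lst : List String) (oddItem : Option String) :
    (match oddItem with
      | none => lst
      | some s => if s = "" then lst else lst ++ [s]).take lst.length = lst := by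
  cases oddItem with
  | none => simp
  | some s =>
    by_cases h : s = ""
    · simp [h]
    · simp only [h, if_false]
      exact List.take_left

lemma len_lst1 (lst : List String) (oddItem : Option String) :
    lst.length ≤ (match oddItem with
      | none => lst
      | some s => if s = "" then lst else lst ++ [s]).length := by
  cases oddItem with
  | none => simp
  | some s =>
    by_cases h : s = ""
    · simp [h]
    · simp only [h, if_false, List.length_append]
      omega

-- ===== VERDICT (by name: the statement is the Claim_ definition above) =====
theorem add_rev_and_odd_spec : Claim_equal_add_rev_and_odd := by
  intro lst oddItem hdom
  clear hdom
  unfold Spec_add_rev_and_odd add_rev_and_odd add_rev_and_odd_alt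
  simp only [Int.toNat_natCast, PySem.List.slice?_none_none_neg_one, Option.getD_some]
  have hpre := take_lst1 lst oddItem
  have hlen := len_lst1 lst oddItem
  generalize hlst1 : (match oddItem with
      | none => lst
      | some s => if s = "" then lst else lst ++ [s]) = lst1 at *
  have hrange : PySem.List.pyRange 0 (lst.length : Int) 1
      = (List.range lst.length).map (fun (j : Nat) => (j : Int)) := by
    rw [PySem.List.pyRange_one]
    simp
  rw [hrange]
  have h := fill_loop lst lst1 hlen hpre lst.length le_rfl
  rw [h, List.take_length, Nat.sub_self, List.replicate_zero, List.nil_append]
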